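-- pv_equiv track=rewrite | github.com/YashwanthRathod/Demo-script-localization | Demo-script-localization.py | replace_names
-- ===== SOURCE A (Python) =====
-- def replace_names(text, country):
--     name_mapping = {
--         "India": {"Alex": "Rahul", "Smith": "Sharma"},
--         "German": {"Alex": "Andre", "Smith": "Müller"},
--         "Spanish": {"Alex": "Javier", "Smith": "González"},
--         # Add more country mappings as needed
--     }
--     for original_name, localized_name in name_mapping.get(country, {}).items():
--         text = text.replace(original_name, localized_name)
--     return text
-- ===== SOURCE B (Python) =====
-- def replace_names(text, country):
--     name_mapping = {
--         "India": {"Alex": "Rahul", "Smith": "Sharma"},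
--         "German": {"Alex": "Andre", "Smith": "Müller"},
--         "Spanish": {"Alex": "Javier", "Smith": "González"},
--     }
--     items = list(name_mapping.get(country, {}).items())
--     if not items:
--         return text
--     out = []
--     i = 0
--     n = len(text)
--     while i < n:
--         for key, rep in items:
--             if text.startswith(key, i):
--                 out.append(rep)
--                 i += len(key)
--                 break
--         else:
--             out.append(text[i])
--             i += 1
--     return "".join(out)
-- ===== Notes on version B (the rewrite author's own statement) =====
-- stated objective: alternative
-- what changed: Replaces all names in ONE left-to-right scan of the text (checking each key at the current position and emitting the replacement in place), instead of one full str.replace pass over the whole text per name; equal because the keys never overlap and no replacement value reintroduces a key.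
import Mathlib
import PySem

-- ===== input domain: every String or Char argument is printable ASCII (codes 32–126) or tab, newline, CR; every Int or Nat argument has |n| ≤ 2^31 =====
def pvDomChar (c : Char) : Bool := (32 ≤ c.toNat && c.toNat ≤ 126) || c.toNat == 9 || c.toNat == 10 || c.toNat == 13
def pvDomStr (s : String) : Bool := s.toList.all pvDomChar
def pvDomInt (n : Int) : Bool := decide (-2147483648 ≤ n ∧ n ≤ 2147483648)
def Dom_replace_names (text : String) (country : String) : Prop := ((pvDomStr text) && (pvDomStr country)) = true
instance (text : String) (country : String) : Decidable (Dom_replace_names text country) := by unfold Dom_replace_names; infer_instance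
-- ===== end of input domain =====

-- B replaces the names in ONE left-to-right scan of the text (match a key at the current
-- position, emit its replacement, advance) instead of one full str.replace pass per name;
-- equal because the keys never overlap and no replacement value reintroduces a key.

-- ===== PORT A =====
def replace_names (text : String) (country : String) : String :=
  let name_mapping : PySem.Dict String (PySem.Dict String String) :=
    PySem.Dict.mk
      [("India",   PySem.Dict.mk [("Alex", "Rahul"),  ("Smith", "Sharma")]),
       ("German",  PySem.Dict.mk [("Alex", "Andre"),  ("Smith", "Müller")]),
       ("Spanish", PySem.Dict.mk [("Alex", "Javier"), ("Smith", "González")])]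
  -- for original_name, localized_name in name_mapping.get(country, {}).items(): text = text.replace(...)
  (PySem.Dict.getD name_mapping country (PySem.Dict.mk [])).items.foldl
    (fun t kv => PySem.Str.replace t kv.1 kv.2) text

-- ===== PORT B =====
-- the 'while i < n' loop of Source B: recursion on the remaining suffix of the text;
-- the inner 'for key, rep in items: if text.startswith(key, i): … break / else: …' is items.find?
def scanLoop (items : List (List Char × List Char)) : List Char → List Char
  | [] => []
  | c :: t =>
    match items.find? (fun kv => kv.1.isPrefixOf (c :: t)) with
    | some kv => kv.2 ++ scanLoop items (List.drop (kv.1.length - 1) t)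
    | none => c :: scanLoop items t
termination_by cs => cs.length
decreasing_by
  · simp only [List.length_drop, List.length_cons]; omega
  · simp

def replace_names_alt (text : String) (country : String) : String :=
  let name_mapping : PySem.Dict String (PySem.Dict String String) :=
    PySem.Dict.mk
      [("India",   PySem.Dict.mk [("Alex", "Rahul"),  ("Smith", "Sharma")]),
       ("German",  PySem.Dict.mk [("Alex", "Andre"),  ("Smith", "Müller")]),
       ("Spanish", PySem.Dict.mk [("Alex", "Javier"), ("Smith", "González")])]
  let items := (PySem.Dict.getD name_mapping country (PySem.Dict.mk [])).items.map
    (fun kv => (kv.1.toList, kv.2.toList))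
  if items.isEmpty then text
  else String.ofList (scanLoop items text.toList)

-- ===== PRECONDITION & SPEC =====
def Spec_replace_names (text : String) (country : String) (out : String) : Prop := out = replace_names_alt text country
instance (text : String) (country : String) (out : String) : Decidable (Spec_replace_names text country out) := by unfold Spec_replace_names; infer_instance

-- ===== CLAIM (what is proved, stated in full; the proofs are below) =====
def Claim_equal_replace_names : Prop := ∀ (text : String) (country : String), Dom_replace_names text country → Spec_replace_names text country (replace_names text country)

-- ===== LEMMAS AND PROOFS =====

-- clean fuel-free characterisation of PySem.Chars.replace (for a nonempty pattern)
def repl (old new : List Char) : List Char → List Char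
  | [] => []
  | c :: t =>
    if old.isPrefixOf (c :: t) then new ++ repl old new (List.drop (old.length - 1) t)
    else c :: repl old new t
termination_by cs => cs.length
decreasing_by
  · simp only [List.length_drop, List.length_cons]; omega
  · simp

theorem replace_go_eq (oh : Char) (ot new : List Char) :
    ∀ (n : Nat) (l : List Char) (fuel : Nat) (acc : List Char), l.length ≤ n → l.length ≤ fuel →
      PySem.Chars.replace.go (oh :: ot) new fuel l acc = acc.reverse ++ repl (oh :: ot) new l := by
  intro n
  induction n with
  | zero =>
    intro l fuel acc h1 _
    have hl : l = [] := List.eq_nil_of_length_eq_zero (Nat.le_zero.mp h1)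
    subst hl
    cases fuel with
    | zero => simp [PySem.Chars.replace.go, repl]
    | succ fuel => simp [PySem.Chars.replace.go, repl]
  | succ n ih =>
    intro l fuel acc h1 h2
    cases l with
    | nil =>
      cases fuel with
      | zero => simp [PySem.Chars.replace.go, repl]
      | succ fuel => simp [PySem.Chars.replace.go, repl]
    | cons c t =>
      cases fuel with
      | zero => simp at h2
      | succ fuel =>
        have hstep : PySem.Chars.replace.go (oh :: ot) new (fuel+1) (c :: t) acc =
            if (oh :: ot).isPrefixOf (c :: t) then
              PySem.Chars.replace.go (oh :: ot) new fuel (List.drop (oh :: ot).length (c :: t)) (new.reverse ++ acc)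
            else PySem.Chars.replace.go (oh :: ot) new fuel t (c :: acc) := rfl
        rw [hstep]
        by_cases hp : (oh :: ot).isPrefixOf (c :: t)
        · rw [if_pos hp]
          have hdrop : List.drop (oh :: ot).length (c :: t) = List.drop ((oh :: ot).length - 1) t := by
            simp
          have hlen : (List.drop (oh :: ot).length (c :: t)).length ≤ n := by
            simp only [List.length_drop, List.length_cons] at *
            omega
          have hlen2 : (List.drop (oh :: ot).length (c :: t)).length ≤ fuel := by
            simp only [List.length_drop, List.length_cons] at *
            omega
          rw [ih _ fuel (new.reverse ++ acc) hlen hlen2, hdrop]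
          rw [repl]
          rw [if_pos hp]
          simp
        · rw [if_neg hp]
          have hlen : t.length ≤ n := by simp at h1; omega
          have hlen2 : t.length ≤ fuel := by simp at h2; omega
          rw [ih t fuel (c :: acc) hlen hlen2]
          rw [repl]
          rw [if_neg hp]
          simp

theorem replace_eq_repl (oh : Char) (ot new s : List Char) :
    PySem.Chars.replace s (oh :: ot) new = repl (oh :: ot) new s := by
  unfold PySem.Chars.replace
  rw [if_neg (by simp)]
  simpa using replace_go_eq oh ot new s.length s s.length [] le_rfl le_rfl

-- pushing repl through a block its pattern cannot start in
theorem repl_append_left (oh : Char) (ot new : List Char) :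
    ∀ (l Y : List Char), (∀ c ∈ l, c ≠ oh) →
      repl (oh :: ot) new (l ++ Y) = l ++ repl (oh :: ot) new Y := by
  intro l
  induction l with
  | nil => intro Y _; simp
  | cons c l' ih =>
    intro Y h
    have hc : c ≠ oh := h c (by simp)
    have hp : (oh :: ot).isPrefixOf (c :: (l' ++ Y)) = false := by
      simp [List.isPrefixOf]
      intro h'; exact absurd h'.symm hc
    rw [List.cons_append, repl, if_neg (by simp [hp])]
    rw [ih Y (fun d hd => h d (by simp [hd]))]
    simp

-- a pattern found in the output of repl (with a replacement that cannot start it) was in the input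
theorem prefix_of_repl (oh nh : Char) (ot nt : List Char) :
    ∀ (p : List Char), nh ∉ p → ∀ (cs : List Char),
      p <+: repl (oh :: ot) (nh :: nt) cs → p <+: cs := by
  intro p
  induction p with
  | nil => intro _ cs _; exact List.nil_prefix
  | cons a p' ih =>
    intro hnh cs hpre
    cases cs with
    | nil => rw [repl] at hpre; exact absurd hpre (by simp)
    | cons c t =>
      rw [repl] at hpre
      by_cases hp : (oh :: ot).isPrefixOf (c :: t)
      · rw [if_pos hp] at hpre
        rw [List.cons_append, List.cons_prefix_cons] at hpre
        exact absurd hpre.1 (by intro h; exact hnh (by simp [h]))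
      · rw [if_neg hp] at hpre
        rw [List.cons_prefix_cons] at hpre
        obtain ⟨hac, hp'⟩ := hpre
        have := ih (fun h => hnh (by simp [h])) t hp'
        rw [List.cons_prefix_cons]
        exact ⟨hac, this⟩

theorem scan_step_some (items : List (List Char × List Char)) (c : Char) (t : List Char)
    (kv : List Char × List Char)
    (h : items.find? (fun kv => kv.1.isPrefixOf (c :: t)) = some kv) :
    scanLoop items (c :: t) = kv.2 ++ scanLoop items (List.drop (kv.1.length - 1) t) := by
  rw [scanLoop, h]

theorem scan_step_none (items : List (List Char × List Char)) (c : Char) (t : List Char)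
    (h : items.find? (fun kv => kv.1.isPrefixOf (c :: t)) = none) :
    scanLoop items (c :: t) = c :: scanLoop items t := by
  rw [scanLoop, h]

-- the core: two sequential non-overlapping replaces equal one simultaneous scan
set_option maxRecDepth 8192 in
theorem seq_eq_scan (rh : Char) (rt r2 : List Char)
    (hS : ∀ c ∈ rh :: rt, c ≠ 'S')
    (hsm : rh ∉ (['S','m','i','t','h'] : List Char)) :
    ∀ (n : Nat) (cs : List Char), cs.length ≤ n →
      repl ['S','m','i','t','h'] r2 (repl ['A','l','e','x'] (rh :: rt) cs) =
      scanLoop [(['A','l','e','x'], rh :: rt), (['S','m','i','t','h'], r2)] cs := by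
  intro n
  induction n with
  | zero =>
    intro cs h
    have : cs = [] := List.eq_nil_of_length_eq_zero (Nat.le_zero.mp h)
    subst this
    simp [repl, scanLoop]
  | succ n ih =>
    intro cs hlen
    cases cs with
    | nil => simp [repl, scanLoop]
    | cons c t =>
      by_cases hA : (['A','l','e','x'] : List Char).isPrefixOf (c :: t)
      · -- "Alex" matches here: both sides emit the replacement and continue after it
        rw [repl, if_pos hA]
        rw [repl_append_left 'S' ['m','i','t','h'] r2 (rh :: rt) _ hS]
        have hfind : List.find? (fun kv => kv.1.isPrefixOf (c :: t))
            [(['A','l','e','x'], rh :: rt), (['S','m','i','t','h'], r2)] =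
            some (['A','l','e','x'], rh :: rt) :=
          List.find?_cons_of_pos (by simpa using hA)
        rw [scan_step_some _ _ _ _ hfind]
        have hthree : ((['A','l','e','x'] : List Char).length - 1) = 3 := rfl
        rw [hthree]
        have hlen' : (List.drop 3 t).length ≤ n := by
          simp only [List.length_drop]
          simp at hlen; omega
        rw [ih (List.drop 3 t) hlen']
      · by_cases hSm : (['S','m','i','t','h'] : List Char).isPrefixOf (c :: t)
        · -- "Smith" matches here
          obtain ⟨rest, hrest⟩ := List.isPrefixOf_iff_prefix.mp hSm
          have hct : c :: t = 'S' :: 'm' :: 'i' :: 't' :: 'h' :: rest := hrest.symm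
          injection hct with hc ht
          subst hc; subst ht
          have hAlex : repl ['A','l','e','x'] (rh :: rt) ('S' :: 'm' :: 'i' :: 't' :: 'h' :: rest) =
              'S' :: 'm' :: 'i' :: 't' :: 'h' :: repl ['A','l','e','x'] (rh :: rt) rest := by
            have := repl_append_left 'A' ['l','e','x'] (rh :: rt)
              (['S','m','i','t','h'] : List Char) rest (by simp)
            simpa using this
          rw [hAlex]
          rw [repl]
          rw [if_pos (by simp [List.isPrefixOf])]
          have hdrop : List.drop ((['S','m','i','t','h'] : List Char).length - 1)
              ('m' :: 'i' :: 't' :: 'h' :: repl ['A','l','e','x'] (rh :: rt) rest) =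
              repl ['A','l','e','x'] (rh :: rt) rest := rfl
          rw [hdrop]
          have hfind : List.find? (fun kv => kv.1.isPrefixOf
              ('S' :: 'm' :: 'i' :: 't' :: 'h' :: rest))
              [(['A','l','e','x'], rh :: rt), (['S','m','i','t','h'], r2)] =
              some (['S','m','i','t','h'], r2) := by
            rw [List.find?_cons_of_neg (by simp)]
            rw [List.find?_cons_of_pos (by simp)]
          rw [scan_step_some _ _ _ _ hfind]
          have hdrop2 : List.drop ((['S','m','i','t','h'] : List Char).length - 1)
              ('m' :: 'i' :: 't' :: 'h' :: rest) = rest := rfl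
          rw [hdrop2]
          have hlen' : rest.length ≤ n := by
            simp at hlen; omega
          rw [ih rest hlen']
        · -- no key matches here: both sides copy the character
          rw [repl, if_neg hA]
          have hnotS : ¬ (['S','m','i','t','h'] : List Char).isPrefixOf
              (c :: repl ['A','l','e','x'] (rh :: rt) t) := by
            intro hcon
            have h1 : (['S','m','i','t','h'] : List Char) <+:
                repl ['A','l','e','x'] (rh :: rt) (c :: t) := by
              rw [repl, if_neg hA]
              exact List.isPrefixOf_iff_prefix.mp hcon
            have h2 := prefix_of_repl 'A' rh ['l','e','x'] rt
              (['S','m','i','t','h'] : List Char) hsm (c :: t) h1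
            exact hSm (List.isPrefixOf_iff_prefix.mpr h2)
          rw [repl, if_neg hnotS]
          have hfind : List.find? (fun kv => kv.1.isPrefixOf (c :: t))
              [(['A','l','e','x'], rh :: rt), (['S','m','i','t','h'], r2)] = none := by
            rw [List.find?_cons_of_neg (by simpa using hA),
                List.find?_cons_of_neg (by simpa using hSm)]
            rfl
          rw [scan_step_none _ _ _ hfind]
          have hlen' : t.length ≤ n := by simp at hlen; omega
          rw [ih t hlen']

-- one country, sequential replaces on the String side = the scan on the String side
theorem country_case (text : String) (r1 r2 : String) (rh : Char) (rt : List Char)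
    (hr1 : r1.toList = rh :: rt)
    (hS : ∀ c ∈ rh :: rt, c ≠ 'S')
    (hsm : rh ∉ (['S','m','i','t','h'] : List Char)) :
    PySem.Str.replace (PySem.Str.replace text "Alex" r1) "Smith" r2 =
      String.ofList (scanLoop [(['A','l','e','x'], rh :: rt), (['S','m','i','t','h'], r2.toList)] text.toList) := by
  apply String.toList_inj.mp
  rw [PySem.Str.toList_replace, PySem.Str.toList_replace]
  have h1 : ("Alex" : String).toList = ['A','l','e','x'] := rfl
  have h2 : ("Smith" : String).toList = ['S','m','i','t','h'] := rfl
  rw [h1, h2, hr1]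
  rw [replace_eq_repl 'A' ['l','e','x'] (rh :: rt) text.toList]
  rw [replace_eq_repl 'S' ['m','i','t','h'] r2.toList]
  rw [seq_eq_scan rh rt r2.toList hS hsm text.toList.length text.toList le_rfl]
  simp

-- ===== VERDICT (by name: the statement is the Claim_ definition above) =====
set_option maxRecDepth 8192 in
theorem replace_names_spec : Claim_equal_replace_names := by
  intro text country _
  unfold Spec_replace_names
  by_cases h1 : country = "India"
  · subst h1
    have hget : PySem.Dict.getD
        (PySem.Dict.mk
          [("India",   PySem.Dict.mk [("Alex", "Rahul"),  ("Smith", "Sharma")]),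
           ("German",  PySem.Dict.mk [("Alex", "Andre"),  ("Smith", "Müller")]),
           ("Spanish", PySem.Dict.mk [("Alex", "Javier"), ("Smith", "González")])])
        "India" (PySem.Dict.mk ([] : List (String × String))) =
        PySem.Dict.mk [("Alex", "Rahul"), ("Smith", "Sharma")] := by
      rw [PySem.Dict.getD_eq_get?_getD, PySem.Dict.get?_mk_cons, if_pos (by simp)]
      rfl
    have hA0 : replace_names text "India" =
        (PySem.Dict.getD
          (PySem.Dict.mk
            [("India",   PySem.Dict.mk [("Alex", "Rahul"),  ("Smith", "Sharma")]),
             ("German",  PySem.Dict.mk [("Alex", "Andre"),  ("Smith", "Müller")]),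
             ("Spanish", PySem.Dict.mk [("Alex", "Javier"), ("Smith", "González")])])
          "India" (PySem.Dict.mk [])).items.foldl
          (fun t kv => PySem.Str.replace t kv.1 kv.2) text := rfl
    have hB0 : replace_names_alt text "India" =
        (let items := (PySem.Dict.getD
          (PySem.Dict.mk
            [("India",   PySem.Dict.mk [("Alex", "Rahul"),  ("Smith", "Sharma")]),
             ("German",  PySem.Dict.mk [("Alex", "Andre"),  ("Smith", "Müller")]),
             ("Spanish", PySem.Dict.mk [("Alex", "Javier"), ("Smith", "González")])])
          "India" (PySem.Dict.mk [])).items.map (fun kv => (kv.1.toList, kv.2.toList));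
         if items.isEmpty then text else String.ofList (scanLoop items text.toList)) := rfl
    rw [hget] at hA0 hB0
    have hA : replace_names text "India" =
        PySem.Str.replace (PySem.Str.replace text "Alex" "Rahul") "Smith" "Sharma" := by
      rw [hA0]; rfl
    have hB : replace_names_alt text "India" =
        String.ofList (scanLoop [(['A','l','e','x'], ['R','a','h','u','l']),
          (['S','m','i','t','h'], ['S','h','a','r','m','a'])] text.toList) := by
      rw [hB0]; rfl
    rw [hA, hB]
    exact country_case text "Rahul" "Sharma" 'R' ['a','h','u','l'] rfl (by simp) (by decide)
  · by_cases h2 : country = "German"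
    · subst h2
      have hget : PySem.Dict.getD
          (PySem.Dict.mk
            [("India",   PySem.Dict.mk [("Alex", "Rahul"),  ("Smith", "Sharma")]),
             ("German",  PySem.Dict.mk [("Alex", "Andre"),  ("Smith", "Müller")]),
             ("Spanish", PySem.Dict.mk [("Alex", "Javier"), ("Smith", "González")])])
          "German" (PySem.Dict.mk ([] : List (String × String))) =
          PySem.Dict.mk [("Alex", "Andre"), ("Smith", "Müller")] := by
        rw [PySem.Dict.getD_eq_get?_getD, PySem.Dict.get?_mk_cons, if_neg (by simp),
            PySem.Dict.get?_mk_cons, if_pos (by simp)]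
        rfl
      have hA0 : replace_names text "German" =
          (PySem.Dict.getD
            (PySem.Dict.mk
              [("India",   PySem.Dict.mk [("Alex", "Rahul"),  ("Smith", "Sharma")]),
               ("German",  PySem.Dict.mk [("Alex", "Andre"),  ("Smith", "Müller")]),
               ("Spanish", PySem.Dict.mk [("Alex", "Javier"), ("Smith", "González")])])
            "German" (PySem.Dict.mk [])).items.foldl
            (fun t kv => PySem.Str.replace t kv.1 kv.2) text := rfl
      have hB0 : replace_names_alt text "German" =
          (let items := (PySem.Dict.getD
            (PySem.Dict.mk
              [("India",   PySem.Dict.mk [("Alex", "Rahul"),  ("Smith", "Sharma")]),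
               ("German",  PySem.Dict.mk [("Alex", "Andre"),  ("Smith", "Müller")]),
               ("Spanish", PySem.Dict.mk [("Alex", "Javier"), ("Smith", "González")])])
            "German" (PySem.Dict.mk [])).items.map (fun kv => (kv.1.toList, kv.2.toList));
           if items.isEmpty then text else String.ofList (scanLoop items text.toList)) := rfl
      rw [hget] at hA0 hB0
      have hA : replace_names text "German" =
          PySem.Str.replace (PySem.Str.replace text "Alex" "Andre") "Smith" "Müller" := by
        rw [hA0]; rfl
      have hB : replace_names_alt text "German" =
          String.ofList (scanLoop [(['A','l','e','x'], ['A','n','d','r','e']),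
            (['S','m','i','t','h'], ['M','ü','l','l','e','r'])] text.toList) := by
        rw [hB0]; rfl
      rw [hA, hB]
      exact country_case text "Andre" "Müller" 'A' ['n','d','r','e'] rfl (by simp) (by decide)
    · by_cases h3 : country = "Spanish"
      · subst h3
        have hget : PySem.Dict.getD
            (PySem.Dict.mk
              [("India",   PySem.Dict.mk [("Alex", "Rahul"),  ("Smith", "Sharma")]),
               ("German",  PySem.Dict.mk [("Alex", "Andre"),  ("Smith", "Müller")]),
               ("Spanish", PySem.Dict.mk [("Alex", "Javier"), ("Smith", "González")])])
            "Spanish" (PySem.Dict.mk ([] : List (String × String))) =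
            PySem.Dict.mk [("Alex", "Javier"), ("Smith", "González")] := by
          rw [PySem.Dict.getD_eq_get?_getD, PySem.Dict.get?_mk_cons, if_neg (by simp),
              PySem.Dict.get?_mk_cons, if_neg (by simp),
              PySem.Dict.get?_mk_cons, if_pos (by simp)]
          rfl
        have hA0 : replace_names text "Spanish" =
            (PySem.Dict.getD
              (PySem.Dict.mk
                [("India",   PySem.Dict.mk [("Alex", "Rahul"),  ("Smith", "Sharma")]),
                 ("German",  PySem.Dict.mk [("Alex", "Andre"),  ("Smith", "Müller")]),
                 ("Spanish", PySem.Dict.mk [("Alex", "Javier"), ("Smith", "González")])])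
              "Spanish" (PySem.Dict.mk [])).items.foldl
              (fun t kv => PySem.Str.replace t kv.1 kv.2) text := rfl
        have hB0 : replace_names_alt text "Spanish" =
            (let items := (PySem.Dict.getD
              (PySem.Dict.mk
                [("India",   PySem.Dict.mk [("Alex", "Rahul"),  ("Smith", "Sharma")]),
                 ("German",  PySem.Dict.mk [("Alex", "Andre"),  ("Smith", "Müller")]),
                 ("Spanish", PySem.Dict.mk [("Alex", "Javier"), ("Smith", "González")])])
              "Spanish" (PySem.Dict.mk [])).items.map (fun kv => (kv.1.toList, kv.2.toList));
             if items.isEmpty then text else String.ofList (scanLoop items text.toList)) := rfl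
        rw [hget] at hA0 hB0
        have hA : replace_names text "Spanish" =
            PySem.Str.replace (PySem.Str.replace text "Alex" "Javier") "Smith" "González" := by
          rw [hA0]; rfl
        have hB : replace_names_alt text "Spanish" =
            String.ofList (scanLoop [(['A','l','e','x'], ['J','a','v','i','e','r']),
              (['S','m','i','t','h'], ['G','o','n','z','á','l','e','z'])] text.toList) := by
          rw [hB0]; rfl
        rw [hA, hB]
        exact country_case text "Javier" "González" 'J' ['a','v','i','e','r'] rfl (by simp) (by decide)
      · -- unknown country: the mapping is empty and both programs return the text unchanged
        have hget : PySem.Dict.getD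
            (PySem.Dict.mk
              [("India",   PySem.Dict.mk [("Alex", "Rahul"),  ("Smith", "Sharma")]),
               ("German",  PySem.Dict.mk [("Alex", "Andre"),  ("Smith", "Müller")]),
               ("Spanish", PySem.Dict.mk [("Alex", "Javier"), ("Smith", "González")])])
            country (PySem.Dict.mk ([] : List (String × String))) = PySem.Dict.mk [] := by
          rw [PySem.Dict.getD_eq_get?_getD]
          rw [PySem.Dict.get?_mk_cons, if_neg (by simp [Ne.symm h1])]
          rw [PySem.Dict.get?_mk_cons, if_neg (by simp [Ne.symm h2])]
          rw [PySem.Dict.get?_mk_cons, if_neg (by simp [Ne.symm h3])]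
          rfl
        have hA : replace_names text country =
            (PySem.Dict.getD
              (PySem.Dict.mk
                [("India",   PySem.Dict.mk [("Alex", "Rahul"),  ("Smith", "Sharma")]),
                 ("German",  PySem.Dict.mk [("Alex", "Andre"),  ("Smith", "Müller")]),
                 ("Spanish", PySem.Dict.mk [("Alex", "Javier"), ("Smith", "González")])])
              country (PySem.Dict.mk [])).items.foldl
              (fun t kv => PySem.Str.replace t kv.1 kv.2) text := rfl
        have hB : replace_names_alt text country =
            (let items := (PySem.Dict.getD
              (PySem.Dict.mk
                [("India",   PySem.Dict.mk [("Alex", "Rahul"),  ("Smith", "Sharma")]),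
                 ("German",  PySem.Dict.mk [("Alex", "Andre"),  ("Smith", "Müller")]),
                 ("Spanish", PySem.Dict.mk [("Alex", "Javier"), ("Smith", "González")])])
              country (PySem.Dict.mk [])).items.map (fun kv => (kv.1.toList, kv.2.toList));
             if items.isEmpty then text else String.ofList (scanLoop items text.toList)) := rfl
        rw [hget] at hA hB
        rw [hA, hB]
        rfl
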